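-- pv_equiv track=rewrite | github.com/jalddak/ps_training | python/with_java/programmers/level 3/최고의 집합.py | solution
-- ===== SOURCE A (Python) =====
-- def solution(n, s):
--     if s // n == 0:
--         return [-1]
--     answer = [s // n for _ in range(n)]
--     per = s % n
--     i = n-1
--     for _ in range(per):
--         answer[i] += 1
--         i -= 1
--     return answer
-- ===== SOURCE B (Python) =====
-- def solution(n, s):
--     if s // n == 0:
--         return [-1]
--     out = []
--     k, r = n, s
--     while k > 0:
--         q = -(-r // k)   # ceiling of the remaining average fills the last open slot
--         out.append(q)
--         r -= q
--         k -= 1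
--     out.reverse()
--     return out
-- ===== Notes on version B (the rewrite author's own statement) =====
-- stated objective: alternative
-- what changed: Replaces the fill-then-increment construction by a greedy loop: each step assigns the ceiling of the remaining average ceil(r/k) to the last open slot and updates the remainder, so no precomputed quotient/remainder pair or increment pass exists in B.
import Mathlib
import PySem

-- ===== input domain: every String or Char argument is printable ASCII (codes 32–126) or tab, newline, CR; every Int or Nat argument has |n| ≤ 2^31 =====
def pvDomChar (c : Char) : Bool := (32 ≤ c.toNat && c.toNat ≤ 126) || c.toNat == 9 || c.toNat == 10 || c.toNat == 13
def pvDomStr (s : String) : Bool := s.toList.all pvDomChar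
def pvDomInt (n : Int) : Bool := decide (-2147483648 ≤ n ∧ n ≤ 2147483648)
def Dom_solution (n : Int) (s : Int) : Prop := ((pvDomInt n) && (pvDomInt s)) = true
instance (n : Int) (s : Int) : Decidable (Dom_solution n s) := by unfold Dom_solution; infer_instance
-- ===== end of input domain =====

-- B replaces A's fill-then-increment construction by a greedy recursion that gives the
-- last slot the ceiling of the remaining average and recurses (alternative, same cost).


-- ===== PORT A =====
-- answer[i] += 1 ; exact here: whenever A's loop body runs, 0 ≤ i < answer.length
def pyIncAt (l : List Int) (i : Int) : List Int := l.set i.toNat (l.getD i.toNat 0 + 1)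

def solution (n : Int) (s : Int) : List Int :=
  if PySem.Int.floordiv s n = 0 then [-1]
  else
    let answer := (PySem.List.pyRange 0 n 1).map (fun _ => PySem.Int.floordiv s n)
    let per := PySem.Int.mod s n
    let st := (PySem.List.pyRange 0 per 1).foldl
      (fun (st : List Int × Int) _ => (pyIncAt st.1 st.2, st.2 - 1)) (answer, n - 1)
    st.1

-- ===== PORT B =====
-- the while loop: append ceil(r/k) = -(-r // k), update (k, r); reversed afterwards
def pvLoop (k : Int) (r : Int) (out : List Int) : List Int :=
  if k ≤ 0 then out
  else
    let q := -(PySem.Int.floordiv (-r) k)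
    pvLoop (k - 1) (r - q) (out ++ [q])
termination_by k.toNat
decreasing_by omega

def solution_alt (n : Int) (s : Int) : List Int :=
  if PySem.Int.floordiv s n = 0 then [-1]
  else (pvLoop n s []).reverse

-- ===== PRECONDITION & SPEC =====
-- n = 0 makes both Pythons raise ZeroDivisionError
def Pre_solution (n : Int) (s : Int) : Prop := n ≠ 0
instance (n : Int) (s : Int) : Decidable (Pre_solution n s) := by unfold Pre_solution; infer_instance
def pvWitness_solution : Int × Int := (3, 11)

def Spec_solution (n : Int) (s : Int) (out : List Int) : Prop := out = solution_alt n s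
instance (n : Int) (s : Int) (out : List Int) : Decidable (Spec_solution n s out) := by unfold Spec_solution; infer_instance

-- ===== CLAIM (what is proved, stated in full; the proofs are below) =====
def Claim_equal_solution : Prop := ∀ (n : Int) (s : Int), Dom_solution n s → Pre_solution n s → Spec_solution n s (solution n s)

-- ===== LEMMAS AND PROOFS =====

-- recursive restatement of B's loop: pvLoop k r out = out ++ (pvBuild k r).reverse
def pvBuild (k : Int) (r : Int) : List Int :=
  if k ≤ 0 then []
  else
    let q := -(PySem.Int.floordiv (-r) k)
    pvBuild (k - 1) (r - q) ++ [q]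
termination_by k.toNat
decreasing_by omega

lemma pvLoop_eq : ∀ (m : Nat) (k r : Int) (out : List Int), k.toNat = m →
    pvLoop k r out = out ++ (pvBuild k r).reverse := by
  intro m
  induction m with
  | zero =>
      intro k r out hm
      rw [pvLoop, pvBuild]
      simp only [if_pos (by omega : k ≤ 0)]
      simp
  | succ m ih =>
      intro k r out hm
      rw [pvLoop, pvBuild]
      by_cases hk : k ≤ 0
      · simp [hk]
      · simp only [if_neg hk]
        rw [ih (k - 1) _ _ (by omega)]
        simp

-- shorthand for the intermediate lists: m base values then k incremented values
def pvL (m k : Nat) (b : Int) : List Int := List.replicate m b ++ List.replicate k (b + 1)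

-- A's loop step
def pvStep (st : List Int × Int) : List Int × Int := (pyIncAt st.1 st.2, st.2 - 1)

lemma pvFoldl_const {α σ : Type} (f : σ → σ) : ∀ (l : List α) (st : σ),
    l.foldl (fun s _ => f s) st = f^[l.length] st := by
  intro l
  induction l with
  | nil => intro st; rfl
  | cons a t ih =>
      intro st
      simp [List.foldl_cons, ih, Function.iterate_succ_apply]

lemma pvStep_L (m k : Nat) (b : Int) (hm : 1 ≤ m) :
    pvStep (pvL m k b, (m : Int) - 1) = (pvL (m - 1) (k + 1) b, ((m - 1 : Nat) : Int) - 1) := by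
  obtain ⟨m', rfl⟩ : ∃ m', m = m' + 1 := ⟨m - 1, by omega⟩
  have hto : (((m' + 1 : Nat) : Int) - 1).toNat = m' := by omega
  unfold pvStep pyIncAt pvL
  rw [hto]
  have hrep : List.replicate (m' + 1) b = List.replicate m' b ++ [b] := by
    simp [List.replicate_succ']
  have hgetD : (List.replicate (m' + 1) b ++ List.replicate k (b + 1)).getD m' 0 = b := by
    rw [List.getD_eq_getElem?_getD, List.getElem?_append_left (by simp),
        List.getElem?_replicate_of_lt (by omega)]
    rfl
  rw [hgetD]
  rw [hrep, List.append_assoc, List.set_append]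
  simp only [List.length_replicate, lt_self_iff_false, if_false, Nat.sub_self]
  have : ([b] ++ List.replicate k (b + 1)).set 0 (b + 1) = List.replicate (k + 1) (b + 1) := by
    simp [List.replicate_succ]
  rw [this]
  simp

lemma pvIter_L (j : Nat) : ∀ (m k : Nat) (b : Int), j ≤ m →
    pvStep^[j] (pvL m k b, (m : Int) - 1) = (pvL (m - j) (k + j) b, ((m - j : Nat) : Int) - 1) := by
  induction j with
  | zero => intro m k b _; simp
  | succ j ih =>
      intro m k b hj
      rw [Function.iterate_succ_apply, pvStep_L m k b (by omega), ih (m - 1) (k + 1) b (by omega)]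
      congr 2 <;> omega

-- A's value on positive n: the tail-heavy closed form pvL
lemma pvA_closed (n s : Int) (hpos : 0 < n) (hb : PySem.Int.floordiv s n ≠ 0) :
    solution n s
      = pvL (n - PySem.Int.mod s n).toNat (PySem.Int.mod s n).toNat (PySem.Int.floordiv s n) := by
  unfold solution
  simp only [hb, if_false]
  have hmod0 := PySem.Int.mod_nonneg s hpos
  have hmodlt := PySem.Int.mod_lt s hpos
  set base := PySem.Int.floordiv s n with hbase
  set per := PySem.Int.mod s n with hper
  have hmapconst : (PySem.List.pyRange 0 n 1).map (fun _ => base)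
      = List.replicate n.toNat base := by
    rw [List.map_const']
    simp [PySem.List.length_pyRange_one]
  have hlen : (PySem.List.pyRange 0 per 1).length = per.toNat := by
    simp [PySem.List.length_pyRange_one]
  have hinit : (List.replicate n.toNat base, n - 1)
      = (pvL n.toNat 0 base, (n.toNat : Int) - 1) := by
    unfold pvL; simp; omega
  simp only [hmapconst]
  show ((PySem.List.pyRange 0 per 1).foldl
    (fun (st : List Int × Int) _ => (pyIncAt st.1 st.2, st.2 - 1))
    (List.replicate n.toNat base, n - 1)).1 = _
  have hstep : (fun (st : List Int × Int) (_ : Int) => (pyIncAt st.1 st.2, st.2 - 1))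
      = fun st _ => pvStep st := rfl
  rw [hstep, pvFoldl_const pvStep, hlen, hinit, pvIter_L per.toNat n.toNat 0 base (by omega)]
  unfold pvL
  have : (n - per).toNat = n.toNat - per.toNat := by omega
  simp [this]

-- B's greedy recursion also produces pvL, by induction on k
lemma pvBuild_closed : ∀ (m : Nat) (k r : Int), k.toNat = m → 0 < k →
    pvBuild k r
      = pvL (k - PySem.Int.mod r k).toNat (PySem.Int.mod r k).toNat (PySem.Int.floordiv r k) := by
  intro m
  induction m with
  | zero => intro k r hm hk; omega
  | succ m ih =>
      intro k r hm hk
      have hmod0 := PySem.Int.mod_nonneg r hk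
      have hmodlt := PySem.Int.mod_lt r hk
      have hsum := PySem.Int.floordiv_mul_add_mod r k
      set b := PySem.Int.floordiv r k with hbdef
      set p := PySem.Int.mod r k with hpdef
      -- the ceiling step q = b if p = 0, else b + 1
      have hq : -(PySem.Int.floordiv (-r) k) = (if p = 0 then b else b + 1) := by
        rw [PySem.Int.neg_floordiv_neg_eq_iff_of_pos hk]
        by_cases hp : p = 0
        · simp only [hp, if_true]
          constructor <;> nlinarith [hsum, hmod0]
        · have hp' : 0 < p := by omega
          simp only [hp, if_false]
          constructor <;> nlinarith [hsum, hp', hmodlt]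
      rw [pvBuild]
      simp only [not_le.mpr hk, if_false, hq]
      by_cases hk1 : k = 1
      · -- base case of the greedy: one slot left, p = 0, q = b
        have hp : p = 0 := by omega
        subst hk1
        simp only [hp, if_true]
        rw [pvBuild]
        norm_num
        unfold pvL
        norm_num
      · -- k ≥ 2: the recursive call sees the same base and one fewer +1
        have hk2 : 2 ≤ k := by omega
        by_cases hp : p = 0
        · have hfd : PySem.Int.floordiv (r - b) (k - 1) = b := by
            rw [PySem.Int.floordiv_eq_iff_of_pos (by omega)]
            constructor <;> nlinarith [hsum]
          have hmd : PySem.Int.mod (r - b) (k - 1) = 0 := by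
            have := PySem.Int.floordiv_mul_add_mod (r - b) (k - 1)
            rw [hfd] at this
            nlinarith [hsum]
          simp only [hp, if_true]
          rw [ih (k - 1) (r - b) (by omega) (by omega), hmd, hfd]
          unfold pvL
          have h1 : (k - 1 - 0).toNat = (k - 0).toNat - 1 := by omega
          have h2 : 1 ≤ (k - 0 : Int).toNat := by omega
          rw [h1]
          simp only [Int.toNat_zero, List.replicate_zero, List.append_nil]
          rw [← List.replicate_succ' (a := b)]
          congr 1
          omega
        · have hfd : PySem.Int.floordiv (r - (b + 1)) (k - 1) = b := by
            have hp' : 0 < p := by omega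
            rw [PySem.Int.floordiv_eq_iff_of_pos (by omega)]
            constructor <;> nlinarith [hsum, hp', hmodlt]
          have hmd : PySem.Int.mod (r - (b + 1)) (k - 1) = p - 1 := by
            have := PySem.Int.floordiv_mul_add_mod (r - (b + 1)) (k - 1)
            rw [hfd] at this
            nlinarith [hsum]
          simp only [hp, if_false]
          rw [ih (k - 1) (r - (b + 1)) (by omega) (by omega), hmd, hfd]
          unfold pvL
          have h1 : (k - 1 - (p - 1)).toNat = (k - p).toNat := by omega
          have h2 : p.toNat = (p - 1).toNat + 1 := by omega
          rw [h1, h2, List.replicate_succ' (a := b + 1)]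
          simp [List.append_assoc]

lemma solution_eq (n s : Int) (hn : n ≠ 0) : solution n s = solution_alt n s := by
  unfold solution_alt
  by_cases hb : PySem.Int.floordiv s n = 0
  · unfold solution; simp [hb]
  · simp only [hb, if_false]
    rcases lt_or_gt_of_ne hn with hneg | hpos
    · -- n < 0: A's comprehension and loop are both empty; B's recursion stops at once
      have hmod := PySem.Int.mod_neg_bounds s hneg
      unfold solution
      have h1 : PySem.List.pyRange 0 n 1 = [] := PySem.List.pyRange_one_eq_nil (by omega)
      have h2 : PySem.List.pyRange 0 (PySem.Int.mod s n) 1 = [] :=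
        PySem.List.pyRange_one_eq_nil (by omega)
      rw [pvLoop_eq n.toNat n s [] rfl, pvBuild]
      simp [h1, h2, hb, le_of_lt hneg]
    · rw [pvA_closed n s hpos hb, pvLoop_eq n.toNat n s [] rfl,
        pvBuild_closed n.toNat n s rfl hpos]
      simp

-- ===== VERDICT (by name: the statement is the Claim_ definition above) =====
theorem solution_spec : Claim_equal_solution := by
  intro n s _ hpre
  unfold Spec_solution
  exact solution_eq n s hpre
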